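-- pv_equiv track=rewrite | github.com/waynesankey/bridge2_sw | main.py | _next_uart_marker_index
-- ===== SOURCE A (Python) =====
-- def _next_uart_marker_index(text, start):
--     markers = (
--         "STATE ",
--         "SELECTOR_LABELS",
--         "AMP_STATES",
--         "TUBE ",
--         "ACK ",
--         "DONE SAVE",
--         "ERR ",
--         "END TUBES",
--         "TUBES_END",
--     )
--     found = -1
--     for marker in markers:
--         idx = text.find(marker, start)
--         if idx >= 0 and (found < 0 or idx < found):
--             found = idx
--     return found
-- ===== SOURCE B (Python) =====
-- def _next_uart_marker_index(text, start):
--     markers = (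
--         "STATE ",
--         "SELECTOR_LABELS",
--         "AMP_STATES",
--         "TUBE ",
--         "ACK ",
--         "DONE SAVE",
--         "ERR ",
--         "END TUBES",
--         "TUBES_END",
--     )
--     n = len(text)
--     i = start if start >= 0 else max(start + n, 0)
--     for j in range(i, n):
--         if text.startswith(markers, j):
--             return j
--     return -1
-- ===== Notes on version B (the rewrite author's own statement) =====
-- stated objective: idiomatic
-- what changed: Replaces nine separate text.find scans with running minimum by a single left-to-right scan over positions that returns the first position where text.startswith(markers, j) holds for the marker tuple.
import Mathlib
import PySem

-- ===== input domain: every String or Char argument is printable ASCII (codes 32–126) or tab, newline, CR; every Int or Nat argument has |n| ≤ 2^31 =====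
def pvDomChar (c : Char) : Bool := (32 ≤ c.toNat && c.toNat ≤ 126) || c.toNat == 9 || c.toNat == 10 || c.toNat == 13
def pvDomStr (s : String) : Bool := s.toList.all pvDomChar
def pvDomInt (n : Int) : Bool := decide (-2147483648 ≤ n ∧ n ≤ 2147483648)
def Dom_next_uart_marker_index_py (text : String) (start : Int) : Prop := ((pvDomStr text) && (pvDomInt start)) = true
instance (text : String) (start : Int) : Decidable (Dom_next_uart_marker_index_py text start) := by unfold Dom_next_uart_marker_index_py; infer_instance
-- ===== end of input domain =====

-- B replaces nine separate find-with-minimum scans by one left-to-right scan returning the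
-- first position where some marker starts (idiomatic single pass; same asymptotic cost).

-- the fixed marker tuple both versions share (data, not logic)
def pvMarkers : List String :=
  ["STATE ", "SELECTOR_LABELS", "AMP_STATES", "TUBE ", "ACK ",
   "DONE SAVE", "ERR ", "END TUBES", "TUBES_END"]

-- ===== PORT A =====
-- for each marker: idx = text.find(marker, start); keep the smallest nonnegative one
def next_uart_marker_index_py (text : String) (start : Int) : Int :=
  pvMarkers.foldl
    (fun found marker =>
      let idx := PySem.Str.findFrom text marker start
      if 0 ≤ idx ∧ (found < 0 ∨ idx < found) then idx else found)
    (-1)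

-- ===== PORT B =====
-- i = start if start >= 0 else max(start + n, 0)
def pvClamp (start : Int) (n : Nat) : Nat :=
  if 0 ≤ start then start.toNat else (start + n).toNat

-- for j in range(i, n): if text.startswith(markers, j): return j  -- else -1
-- text.startswith(m, j) is ported exactly as a prefix test of m on the j-suffix of text
def pvScan (ms : List (List Char)) (j : Nat) : List Char → Int
  | [] => -1
  | c :: rest => if ms.any (fun m => m.isPrefixOf (c :: rest)) then (j : Int) else pvScan ms (j + 1) rest

def next_uart_marker_index_py_alt (text : String) (start : Int) : Int :=
  let cs := text.toList
  let i := pvClamp start cs.length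
  pvScan (pvMarkers.map String.toList) i (cs.drop i)

-- ===== PRECONDITION & SPEC =====
def Spec_next_uart_marker_index_py (text : String) (start : Int) (out : Int) : Prop := out = next_uart_marker_index_py_alt text start
instance (text : String) (start : Int) (out : Int) : Decidable (Spec_next_uart_marker_index_py text start out) := by unfold Spec_next_uart_marker_index_py; infer_instance

-- ===== CLAIM (what is proved, stated in full; the proofs are below) =====
def Claim_equal_next_uart_marker_index_py : Prop := ∀ (text : String) (start : Int), Dom_next_uart_marker_index_py text start → Spec_next_uart_marker_index_py text start (next_uart_marker_index_py text start)

-- ===== LEMMAS AND PROOFS =====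

-- -1-as-∞ minimum of two results
def pvCombine (a b : Int) : Int :=
  if a = -1 then b else if b = -1 then a else if a ≤ b then a else b

theorem pvCombine_keep_left (a b : Int) (ha : 0 ≤ a) (hb : b = -1 ∨ a ≤ b) : pvCombine a b = a := by
  unfold pvCombine; rcases hb with hb | hb <;> split_ifs <;> omega

theorem pvCombine_keep_right (a b : Int) (hb : 0 ≤ b) (ha : a = -1 ∨ b < a) : pvCombine a b = b := by
  unfold pvCombine; rcases ha with ha | ha <;> split_ifs <;> omega

theorem pvScan_nil_markers (j : Nat) (cs : List Char) : pvScan [] j cs = -1 := by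
  induction cs generalizing j with
  | nil => rfl
  | cons c rest ih => simp [pvScan, ih]

theorem pvScan_range (ms : List (List Char)) (j : Nat) (cs : List Char) :
    pvScan ms j cs = -1 ∨ (j : Int) ≤ pvScan ms j cs := by
  induction cs generalizing j with
  | nil => left; rfl
  | cons c rest ih =>
    by_cases h : ms.any (fun m => m.isPrefixOf (c :: rest)) = true
    · right; simp [pvScan, h]
    · rcases ih (j + 1) with h1 | h1
      · left; simpa [pvScan, h] using h1
      · right; simp only [pvScan, h]
        have : (j : Int) ≤ (j + 1 : Nat) := by push_cast; omega
        omega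

theorem pvScan_no (ms : List (List Char)) (cs : List Char)
    (h : ∀ m ∈ ms, ∀ p : Nat, ¬ m <+: cs.drop p) (j : Nat) : pvScan ms j cs = -1 := by
  induction cs generalizing j with
  | nil => rfl
  | cons c rest ih =>
    have hany : ms.any (fun m => m.isPrefixOf (c :: rest)) = false := by
      rw [List.any_eq_false]
      intro m hm
      simp only [List.isPrefixOf_iff_prefix]
      exact fun hp => h m hm 0 (by simpa using hp)
    simp only [pvScan, hany]
    exact ih (fun m hm p hp => h m hm (p + 1) (by simpa using hp)) (j + 1)

theorem pvScan_first (ms : List (List Char)) (cs : List Char) (p : Nat)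
    (hne : ∀ m ∈ ms, m ≠ [])
    (hp : ∃ m ∈ ms, m <+: cs.drop p)
    (hmin : ∀ q < p, ∀ m ∈ ms, ¬ m <+: cs.drop q) (j : Nat) :
    pvScan ms j cs = (j : Int) + p := by
  induction cs generalizing p j with
  | nil =>
    obtain ⟨m, hm, hpre⟩ := hp
    simp only [List.drop_nil] at hpre
    exact absurd (List.prefix_nil.mp hpre) (hne m hm)
  | cons c rest ih =>
    cases p with
    | zero =>
      obtain ⟨m, hm, hpre⟩ := hp
      have hany : ms.any (fun m => m.isPrefixOf (c :: rest)) = true := by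
        rw [List.any_eq_true]
        exact ⟨m, hm, List.isPrefixOf_iff_prefix.mpr (by simpa using hpre)⟩
      simp [pvScan, hany]
    | succ q =>
      have hany : ms.any (fun m => m.isPrefixOf (c :: rest)) = false := by
        rw [List.any_eq_false]
        intro m hm
        simp only [List.isPrefixOf_iff_prefix]
        exact fun hpre => hmin 0 (Nat.succ_pos q) m hm (by simpa using hpre)
      simp only [pvScan, hany]
      have := ih q (by simpa using hp)
        (fun r hr m hm hpre => hmin (r + 1) (by omega) m hm (by simpa using hpre)) (j + 1)
      rw [this]; push_cast; ring

theorem pvClamp_cast (start : Int) (n : Nat) :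
    (if start < 0 then if start + (n : Int) < 0 then 0 else start + n else start)
      = ((pvClamp start n : Nat) : Int) := by
  unfold pvClamp; split_ifs <;> omega

theorem pvFindFrom_eq_scan (s sub : List Char) (start : Int) (hsub : sub ≠ []) :
    PySem.Chars.findFrom s sub start
      = pvScan [sub] (pvClamp start s.length) (s.drop (pvClamp start s.length)) := by
  have hstep : PySem.Chars.findFrom s sub start
      = PySem.Chars.findFrom s sub ((pvClamp start s.length : Nat) : Int) := by
    simp only [PySem.Chars.findFrom, pvClamp_cast start s.length]
    have : ¬ ((pvClamp start s.length : Nat) : Int) < 0 := by omega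
    simp [this]
  rw [hstep]
  set k := pvClamp start s.length with hk
  by_cases hkn : k ≤ s.length
  · rw [PySem.Chars.findFrom_natCast s sub k hkn]
    by_cases hfind : PySem.Chars.find (s.drop k) sub = -1
    · rw [if_pos hfind]
      have hninf : ¬ sub <:+: s.drop k := (PySem.Chars.find_eq_neg_one_iff _ _).mp hfind
      have hno : ∀ p : Nat, ¬ sub <+: (s.drop k).drop p := by
        intro p hpre
        have : PySem.Chars.isIn sub (s.drop k) = true :=
          (PySem.Chars.exists_prefix_drop_iff_isIn sub (s.drop k)).mp ⟨p, hpre⟩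
        rw [← PySem.Chars.isIn_eq_false_iff] at hninf
        simp [hninf] at this
      exact (pvScan_no [sub] (s.drop k) (by simpa using hno) k).symm
    · rw [if_neg hfind]
      have hge : 0 ≤ PySem.Chars.find (s.drop k) sub := by
        have := PySem.Chars.neg_one_le_find (s.drop k) sub
        omega
      obtain ⟨hpre, hmin⟩ := PySem.Chars.find_spec hge
      have := pvScan_first [sub] (s.drop k) (PySem.Chars.find (s.drop k) sub).toNat
        (by simpa using hsub) ⟨sub, by simp, hpre⟩
        (by intro q hq m hm hp; simp only [List.mem_singleton] at hm; subst hm; exact hmin q hq hp) k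
      rw [this, Int.toNat_of_nonneg hge]
  · have hdrop : s.drop k = [] := List.drop_eq_nil_of_le (by omega)
    rw [hdrop]
    have hscan : pvScan [sub] k [] = -1 := rfl
    rw [hscan]
    simp only [PySem.Chars.findFrom]
    have h1 : ¬ ((k : Nat) : Int) < 0 := by omega
    have h2 : ((s.length : Nat) : Int) < ((k : Nat) : Int) := by exact_mod_cast Nat.lt_of_not_le hkn
    simp [h1, h2]

theorem pvCombine_range (a b : Int) (ha : a = -1 ∨ 0 ≤ a) (hb : b = -1 ∨ 0 ≤ b) :
    pvCombine a b = -1 ∨ 0 ≤ pvCombine a b := by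
  unfold pvCombine; rcases ha with ha | ha <;> rcases hb with hb | hb <;> split_ifs <;> omega

theorem pvCombine_assoc (a b c : Int) (ha : a = -1 ∨ 0 ≤ a) (hb : b = -1 ∨ 0 ≤ b)
    (hc : c = -1 ∨ 0 ≤ c) :
    pvCombine (pvCombine a b) c = pvCombine a (pvCombine b c) := by
  unfold pvCombine
  rcases ha with ha | ha <;> rcases hb with hb | hb <;> rcases hc with hc | hc <;>
    split_ifs <;> omega

theorem pvStep_eq_combine (found idx : Int) (hf : found = -1 ∨ 0 ≤ found)
    (hi : idx = -1 ∨ 0 ≤ idx) :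
    (if 0 ≤ idx ∧ (found < 0 ∨ idx < found) then idx else found) = pvCombine found idx := by
  unfold pvCombine
  rcases hf with hf | hf <;> rcases hi with hi | hi <;> split_ifs <;> omega

theorem pvScan_cons (m : List Char) (ms : List (List Char)) (j : Nat) (cs : List Char) :
    pvScan (m :: ms) j cs = pvCombine (pvScan [m] j cs) (pvScan ms j cs) := by
  induction cs generalizing j with
  | nil => rfl
  | cons c rest ih =>
    by_cases hm : m.isPrefixOf (c :: rest) = true
    · have h1 : pvScan [m] j (c :: rest) = (j : Int) := by simp [pvScan, hm]
      have h2 : pvScan (m :: ms) j (c :: rest) = (j : Int) := by simp [pvScan, hm]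
      rw [h2, h1]
      exact (pvCombine_keep_left _ _ (by omega) (pvScan_range ms j (c :: rest))).symm
    · by_cases hms : ms.any (fun m => m.isPrefixOf (c :: rest)) = true
      · have h1 : pvScan [m] j (c :: rest) = pvScan [m] (j + 1) rest := by
          simp [pvScan, hm]
        have h2 : pvScan ms j (c :: rest) = (j : Int) := by simp [pvScan, hms]
        have h3 : pvScan (m :: ms) j (c :: rest) = (j : Int) := by
          simp [pvScan, hm, hms]
        rw [h1, h2, h3]
        refine (pvCombine_keep_right _ _ (by omega) ?_).symm
        rcases pvScan_range [m] (j + 1) rest with h4 | h4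
        · exact Or.inl h4
        · right; push_cast at h4 ⊢; omega
      · have h1 : pvScan [m] j (c :: rest) = pvScan [m] (j + 1) rest := by
          simp [pvScan, hm]
        have h2 : pvScan ms j (c :: rest) = pvScan ms (j + 1) rest := by
          simp [pvScan, hms]
        have h3 : pvScan (m :: ms) j (c :: rest) = pvScan (m :: ms) (j + 1) rest := by
          simp [pvScan, hm, hms]
        rw [h1, h2, h3, ih]

theorem pvFold_eq_combine (s : List Char) (start : Int) (ms : List (List Char))
    (hne : ∀ m ∈ ms, m ≠ []) (a : Int) (ha : a = -1 ∨ 0 ≤ a) :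
    ms.foldl
      (fun found sub =>
        let idx := PySem.Chars.findFrom s sub start
        if 0 ≤ idx ∧ (found < 0 ∨ idx < found) then idx else found) a
      = pvCombine a (pvScan ms (pvClamp start s.length) (s.drop (pvClamp start s.length))) := by
  induction ms generalizing a with
  | nil =>
    rw [pvScan_nil_markers]
    simp only [List.foldl_nil]
    rcases ha with ha | ha <;> (unfold pvCombine; split_ifs <;> omega)
  | cons sub ms ih =>
    set k := pvClamp start s.length with hk
    have hsub : sub ≠ [] := hne sub (by simp)
    have hidx : PySem.Chars.findFrom s sub start = pvScan [sub] k (s.drop k) :=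
      pvFindFrom_eq_scan s sub start hsub
    have hr1 : pvScan [sub] k (s.drop k) = -1 ∨ 0 ≤ pvScan [sub] k (s.drop k) := by
      rcases pvScan_range [sub] k (s.drop k) with h | h
      · exact Or.inl h
      · right; omega
    have hrms : pvScan ms k (s.drop k) = -1 ∨ 0 ≤ pvScan ms k (s.drop k) := by
      rcases pvScan_range ms k (s.drop k) with h | h
      · exact Or.inl h
      · right; omega
    simp only [List.foldl_cons]
    rw [show (let idx := PySem.Chars.findFrom s sub start;
          if 0 ≤ idx ∧ (a < 0 ∨ idx < a) then idx else a)
        = pvCombine a (pvScan [sub] k (s.drop k)) by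
      simp only [hidx]
      exact pvStep_eq_combine a _ ha hr1]
    rw [ih (fun m hm => hne m (by simp [hm])) _ (pvCombine_range _ _ ha hr1)]
    rw [pvScan_cons sub ms k (s.drop k), ← pvCombine_assoc a _ _ ha hr1 hrms]

theorem pvCombine_neg_one_left (b : Int) : pvCombine (-1) b = b := by
  unfold pvCombine; simp

-- ===== VERDICT (by name: the statement is the Claim_ definition above) =====
theorem next_uart_marker_index_py_spec : Claim_equal_next_uart_marker_index_py := by
  intro text start _
  unfold Spec_next_uart_marker_index_py
  unfold next_uart_marker_index_py next_uart_marker_index_py_alt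
  rw [show pvMarkers.foldl
        (fun found marker =>
          let idx := PySem.Str.findFrom text marker start
          if 0 ≤ idx ∧ (found < 0 ∨ idx < found) then idx else found) (-1)
      = (pvMarkers.map String.toList).foldl
        (fun found sub =>
          let idx := PySem.Chars.findFrom text.toList sub start
          if 0 ≤ idx ∧ (found < 0 ∨ idx < found) then idx else found) (-1) by
    rw [List.foldl_map]
    simp only [PySem.Str.findFrom_eq]]
  rw [pvFold_eq_combine text.toList start (pvMarkers.map String.toList)
      (by decide) (-1) (Or.inl rfl)]
  rw [pvCombine_neg_one_left]
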